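-- pv_equiv track=rewrite | github.com/grapheneaffiliate/h4-polytopic-attention | solve_arc_b15.py | solve_a3df8b1e
-- ===== SOURCE A (Python) =====
-- def solve_a3df8b1e(grid):
--     rows, cols = len(grid), len(grid[0])
--     out = [[0]*cols for _ in range(rows)]
--     # Ball starts at bottom-left (rows-1, 0), moves upward
--     # Position at row r from bottom
--     # Pattern: position bounces between 0 and cols-1
--     # At bottom (row rows-1), pos = 0
--     # Going up, pos increases by 1 each row until hitting cols-1, then decreases
--     pos = 0
--     direction = 1  # 1 = moving right, -1 = moving left
--     for r in range(rows-1, -1, -1):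
--         out[r][pos] = 1
--         if r > 0:  # compute next position
--             next_pos = pos + direction
--             if next_pos >= cols:
--                 direction = -1
--                 next_pos = pos + direction
--             elif next_pos < 0:
--                 direction = 1
--                 next_pos = pos + direction
--             pos = next_pos
--     return out
-- ===== SOURCE B (Python) =====
-- def solve_a3df8b1e(grid):
--     rows, cols = len(grid), len(grid[0])
--     if cols == 1:
--         return [[1] for _ in range(rows)]
--     p = 2 * (cols - 1)
--
--     def pos(r):
--         phase = (rows - 1 - r) % p
--         return phase if phase <= cols - 1 else p - phase
--
--     return [[1 if c == pos(r) else 0 for c in range(cols)] for r in range(rows)]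
-- ===== Notes on version B (the rewrite author's own statement) =====
-- stated objective: simpler
-- what changed: Replaces the stateful bounce simulation (pos/direction mutated row by row from the bottom) with an independent closed-form triangle-wave lookup per row: pos(r) = reflect((rows-1-r) mod 2*(cols-1)), cols==1 handled as pos=0.
import Mathlib
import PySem

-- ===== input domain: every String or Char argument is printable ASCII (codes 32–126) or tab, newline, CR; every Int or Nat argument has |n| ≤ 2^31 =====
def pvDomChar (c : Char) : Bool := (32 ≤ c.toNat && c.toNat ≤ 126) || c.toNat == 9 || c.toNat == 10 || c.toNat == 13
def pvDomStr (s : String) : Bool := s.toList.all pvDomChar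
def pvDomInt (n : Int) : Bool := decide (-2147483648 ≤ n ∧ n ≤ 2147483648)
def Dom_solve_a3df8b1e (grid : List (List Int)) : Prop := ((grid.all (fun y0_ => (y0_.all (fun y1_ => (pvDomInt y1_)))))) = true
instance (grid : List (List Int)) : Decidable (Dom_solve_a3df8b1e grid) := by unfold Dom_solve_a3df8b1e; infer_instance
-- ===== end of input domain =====

-- B replaces A's stateful bounce simulation with a per-row closed-form triangle-wave
-- column lookup (objective: simpler); A = B on every grid A accepts (nonempty grid, nonempty first row).


-- ===== PORT A =====
def solve_a3df8b1e (grid : List (List Int)) : List (List Int) :=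
  let rows : Int := PySem.List.len grid
  let cols : Int := PySem.List.len (PySem.List.pyGetD grid 0 [])
  let out0 : List (List Int) :=
    (PySem.List.pyRange 0 rows 1).map (fun _ => List.replicate cols.toNat (0 : Int))
  let st :=
    (PySem.List.pyRange (rows - 1) (-1) (-1)).foldl
      (fun (st : List (List Int) × Int × Int) (r : Int) =>
        let out := st.1
        let pos := st.2.1
        let direction := st.2.2
        let out := PySem.List.pySetD out r (PySem.List.pySetD (PySem.List.pyGetD out r []) pos 1)
        if r > 0 then
          let next_pos := pos + direction
          if next_pos ≥ cols then
            let direction := -1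
            let next_pos := pos + direction
            (out, next_pos, direction)
          else if next_pos < 0 then
            let direction := 1
            let next_pos := pos + direction
            (out, next_pos, direction)
          else (out, next_pos, direction)
        else (out, pos, direction))
      (out0, 0, 1)
  st.1

-- ===== PORT B =====
def solve_a3df8b1e_alt (grid : List (List Int)) : List (List Int) :=
  let rows := grid.length
  let cols := (grid.headD []).length
  if cols = 1 then (List.range rows).map (fun _ => [(1 : Int)])
  else
    let p := 2 * (cols - 1)
    let pos := fun (r : Nat) =>
      let phase := (rows - 1 - r) % p
      if phase ≤ cols - 1 then phase else p - phase
    (List.range rows).map (fun r => (List.range cols).map (fun c => if c = pos r then (1 : Int) else 0))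

-- ===== PRECONDITION & SPEC =====
-- Pre_ excludes exactly the inputs on which A raises IndexError: an empty grid (grid[0])
-- or an empty first row (out[r][pos] on an empty row); A returns on all other inputs.
def Pre_solve_a3df8b1e (grid : List (List Int)) : Prop := grid ≠ [] ∧ grid.headD [] ≠ []
instance (grid : List (List Int)) : Decidable (Pre_solve_a3df8b1e grid) := by
  unfold Pre_solve_a3df8b1e; infer_instance

def pvWitness_solve_a3df8b1e : List (List Int) := [[0, 0, 0], [0, 0, 0], [0, 0, 0], [0, 0, 0]]

def Spec_solve_a3df8b1e (grid : List (List Int)) (out : List (List Int)) : Prop := out = solve_a3df8b1e_alt grid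
instance (grid : List (List Int)) (out : List (List Int)) : Decidable (Spec_solve_a3df8b1e grid out) := by
  unfold Spec_solve_a3df8b1e; infer_instance

-- ===== CLAIM (what is proved, stated in full; the proofs are below) =====
def Claim_equal_solve_a3df8b1e : Prop := ∀ (grid : List (List Int)), Dom_solve_a3df8b1e grid → Pre_solve_a3df8b1e grid → Spec_solve_a3df8b1e grid (solve_a3df8b1e grid)

-- ===== LEMMAS AND PROOFS =====

def pvPos (c d : Nat) : Nat :=
  if c = 1 then 0
  else if d % (2 * (c - 1)) ≤ c - 1 then d % (2 * (c - 1)) else 2 * (c - 1) - d % (2 * (c - 1))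

def pvState (c d : Nat) : Int × Int :=
  if c = 1 then (if d % 2 = 0 then ((0 : Int), (1 : Int)) else ((-1 : Int), (-1 : Int)))
  else ((pvPos c d : Int),
        if d = 0 ∨ (1 ≤ d % (2 * (c - 1)) ∧ d % (2 * (c - 1)) ≤ c - 1) then 1 else -1)

lemma pvSuccMod (p d : Nat) (hp : 2 ≤ p) :
    (d + 1) % p = if d % p + 1 = p then 0 else d % p + 1 := by
  have h1 : (d + 1) % p = (d % p + 1 % p) % p := by rw [Nat.add_mod]
  have h2 : 1 % p = 1 := Nat.mod_eq_of_lt (by omega)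
  have hlt : d % p < p := Nat.mod_lt d (by omega)
  rw [h1, h2]
  split_ifs with h
  · rw [h, Nat.mod_self]
  · exact Nat.mod_eq_of_lt (by omega)

lemma pvPos_lt (c : Nat) (hc : 1 ≤ c) (d : Nat) : pvPos c d < c := by
  unfold pvPos
  by_cases h1 : c = 1
  · simp [h1]
  · have hlt : d % (2 * (c - 1)) < 2 * (c - 1) := Nat.mod_lt d (by omega)
    split_ifs <;> omega

lemma pvStep (c : Nat) (hc : 1 ≤ c) (d : Nat) :
    (if (pvState c d).1 + (pvState c d).2 ≥ (c : Int) then ((pvState c d).1 + -1, (-1 : Int))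
     else if (pvState c d).1 + (pvState c d).2 < 0 then ((pvState c d).1 + 1, (1 : Int))
     else ((pvState c d).1 + (pvState c d).2, (pvState c d).2)) = pvState c (d + 1) := by
  by_cases h1 : c = 1
  · subst h1
    rcases Nat.even_or_odd d with he | ho
    · have h2 : d % 2 = 0 := Nat.even_iff.mp he
      have h3 : (d + 1) % 2 = 1 := by omega
      simp [pvState, h2, h3]
    · have h2 : d % 2 = 1 := Nat.odd_iff.mp ho
      have h3 : (d + 1) % 2 = 0 := by omega
      simp [pvState, h2, h3]
  · have hc2 : 2 ≤ c := by omega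
    have hlt : d % (2 * (c - 1)) < 2 * (c - 1) := Nat.mod_lt d (by omega)
    have hsucc := pvSuccMod (2 * (c - 1)) d (by omega)
    have hd0 : d = 0 → d % (2 * (c - 1)) = 0 := fun h => by simp [h]
    by_cases hw : d % (2 * (c - 1)) + 1 = 2 * (c - 1)
    · rw [if_pos hw] at hsucc
      simp only [pvState, pvPos, if_neg h1, hsucc]
      generalize hg : d % (2 * (c - 1)) = ph at hd0 hlt hw ⊢
      split_ifs <;> (try simp only [false_or] at *) <;> simp only [Prod.mk.injEq] <;>
        first | trivial | (constructor <;> first | trivial | omega)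
    · rw [if_neg hw] at hsucc
      simp only [pvState, pvPos, if_neg h1, hsucc]
      generalize hg : d % (2 * (c - 1)) = ph at hd0 hlt hw ⊢
      split_ifs <;> (try simp only [false_or] at *) <;> simp only [Prod.mk.injEq] <;>
        first | trivial | (constructor <;> first | trivial | omega)

def pvRow (c pos : Nat) : List Int := (List.range c).map (fun j => if j = pos then 1 else 0)

def pvBody (cols : Int) (st : List (List Int) × Int × Int) (r : Int) : List (List Int) × Int × Int :=
  let out := st.1
  let pos := st.2.1
  let direction := st.2.2
  let out := PySem.List.pySetD out r (PySem.List.pySetD (PySem.List.pyGetD out r []) pos 1)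
  if r > 0 then
    let next_pos := pos + direction
    if next_pos ≥ cols then
      let direction := -1
      let next_pos := pos + direction
      (out, next_pos, direction)
    else if next_pos < 0 then
      let direction := 1
      let next_pos := pos + direction
      (out, next_pos, direction)
    else (out, next_pos, direction)
  else (out, pos, direction)

def pvDesc (m : Nat) : List Int := (List.range m).map (fun k : Nat => (m : Int) - 1 - (k : Int))

lemma pvSetRepl (c pos : Nat) :
    (List.replicate c (0 : Int)).set pos 1 = (List.range c).map (fun j => if j = pos then 1 else 0) := by
  apply List.ext_getElem
  · simp
  · intro i h1 h2
    rw [List.getElem_set]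
    simp only [List.getElem_map, List.getElem_range, List.getElem_replicate]
    by_cases hip : pos = i
    · simp [hip]
    · rw [if_neg hip, if_neg (fun hh => hip hh.symm)]

lemma pvMark (c : Nat) (hc : 1 ≤ c) (d : Nat) :
    PySem.List.pySetD (List.replicate c (0 : Int)) (pvState c d).1 1 = pvRow c (pvPos c d) := by
  by_cases h1 : c = 1
  · subst h1
    by_cases h2 : d % 2 = 0 <;> simp [pvState, pvPos, pvRow, h2] <;> decide
  · have hlt := pvPos_lt c hc d
    simp only [pvState, if_neg h1, PySem.List.pySetD_natCast]
    rw [pvSetRepl]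
    rfl

lemma pvDesc_succ (m : Nat) : pvDesc (m + 1) = (m : Int) :: pvDesc m := by
  apply List.ext_getElem
  · simp [pvDesc]
  · intro i h1 h2
    simp only [pvDesc, List.getElem_map, List.getElem_range]
    cases i with
    | zero => simp
    | succ k =>
      simp only [List.getElem_cons_succ, List.getElem_map, List.getElem_range]
      push_cast; ring

lemma pvGetDRange (out : List (List Int)) :
    (List.range out.length).map (fun r => out.getD r []) = out := by
  apply List.ext_getElem
  · simp
  · intro i h1 h2
    simp [List.getD_eq_getElem?_getD, List.getElem?_eq_getElem h2]

lemma pvState_zero (c : Nat) : pvState c 0 = ((0 : Int), (1 : Int)) := by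
  by_cases h1 : c = 1 <;> simp [pvState, pvPos, h1]

lemma pvFoldInv (c : Nat) (hc : 1 ≤ c) (n : Nat) :
    ∀ (m : Nat) (out : List (List Int)), m ≤ n → out.length = n →
    (∀ r, r < m → out[r]? = some (List.replicate c (0 : Int))) →
    ((pvDesc m).foldl (pvBody (c : Int)) (out, pvState c (n - m))).1
      = (List.range n).map (fun r => if r < m then pvRow c (pvPos c (n - 1 - r)) else out.getD r []) := by
  intro m
  induction m with
  | zero =>
    intro out _ hlen _
    simp only [pvDesc, List.range_zero, List.map_nil, List.foldl_nil]
    simp only [Nat.not_lt_zero, if_false]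
    rw [← hlen]
    exact (pvGetDRange out).symm
  | succ m ih =>
    intro out hmn hlen hfresh
    have hmo : m < out.length := by omega
    have hgetD : out.getD m [] = List.replicate c 0 := by
      simp [List.getD_eq_getElem?_getD, hfresh m (by omega)]
    have hbody : pvBody (c : Int) (out, pvState c (n - (m + 1))) (m : Int)
        = (out.set m (pvRow c (pvPos c (n - (m + 1)))),
           if (m : Int) > 0 then pvState c (n - m) else pvState c (n - (m + 1))) := by
      simp only [pvBody, PySem.List.pyGetD_natCast, PySem.List.pySetD_natCast]
      rw [hgetD, pvMark c hc (n - (m + 1))]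
      by_cases hm0 : (m : Int) > 0
      · rw [if_pos hm0, if_pos hm0]
        rw [show n - m = (n - (m + 1)) + 1 from by omega, ← pvStep c hc (n - (m + 1))]
        split_ifs <;> rfl
      · rw [if_neg hm0, if_neg hm0]
    rw [pvDesc_succ, List.foldl_cons, hbody]
    by_cases hm : m = 0
    · subst hm
      simp only [pvDesc, List.range_zero, List.map_nil, List.foldl_nil]
      apply List.ext_getElem
      · simp [hlen]
      · intro i h1 h2
        simp only [List.getElem_map, List.getElem_range]
        by_cases hi0 : i = 0
        · subst hi0
          simp [List.getElem_set_self]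
        · rw [List.getElem_set_ne (by omega)]
          rw [if_neg (by omega)]
          have hi : i < out.length := by simpa using h1
          rw [List.getD_eq_getElem?_getD, List.getElem?_eq_getElem hi, Option.getD_some]
    · have hm0 : (m : Int) > 0 := by exact_mod_cast Nat.pos_of_ne_zero hm
      rw [if_pos hm0]
      rw [ih (out.set m (pvRow c (pvPos c (n - (m + 1))))) (by omega) (by simp [hlen])
          (fun r hr => by rw [List.getElem?_set_ne (by omega)]; exact hfresh r (by omega))]
      apply List.map_congr_left
      intro r hr
      rw [List.mem_range] at hr
      by_cases h1 : r < m
      · rw [if_pos h1, if_pos (by omega)]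
      · by_cases h2 : r = m
        · subst h2
          rw [if_neg h1, if_pos (by omega)]
          rw [List.getD_eq_getElem?_getD, List.getElem?_set_self hmo]
          simp only [Option.getD_some]
          rw [show n - 1 - r = n - (r + 1) from by omega]
        · rw [if_neg h1, if_neg (by omega)]
          rw [List.getD_eq_getElem?_getD, List.getElem?_set_ne (by omega), ← List.getD_eq_getElem?_getD]

lemma pvPortA (grid : List (List Int)) :
    solve_a3df8b1e grid =
      ((PySem.List.pyRange (PySem.List.len grid - 1) (-1) (-1)).foldl
        (pvBody (PySem.List.len (PySem.List.pyGetD grid 0 [])))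
        ((PySem.List.pyRange 0 (PySem.List.len grid) 1).map
          (fun _ => List.replicate (PySem.List.len (PySem.List.pyGetD grid 0 [])).toNat (0 : Int)),
         0, 1)).1 := rfl

lemma pvRangeDesc (n : Nat) : PySem.List.pyRange ((n : Int) - 1) (-1) (-1) = pvDesc n := by
  rw [PySem.List.pyRange_neg_one]
  unfold pvDesc
  rw [show ((n : Int) - 1 - (-1)).toNat = n from by omega]

lemma pvOut0 (n c : Nat) :
    (PySem.List.pyRange 0 (n : Int) 1).map (fun _ => List.replicate c (0 : Int))
      = List.replicate n (List.replicate c (0 : Int)) := by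
  rw [List.eq_replicate_iff]
  constructor
  · rw [List.length_map, PySem.List.length_pyRange_one]
    omega
  · intro b hb
    rcases List.mem_map.mp hb with ⟨x, _, hx⟩
    exact hx.symm

lemma pvMain (grid : List (List Int)) (hpre : grid ≠ [] ∧ grid.headD [] ≠ []) :
    solve_a3df8b1e grid = solve_a3df8b1e_alt grid := by
  obtain ⟨hne, hrow⟩ := hpre
  obtain ⟨g0, gs, rfl⟩ := List.exists_cons_of_ne_nil hne
  have hrow' : g0 ≠ [] := by simpa using hrow
  set n := (g0 :: gs).length with hn
  set c := g0.length with hcdef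
  have hc : 1 ≤ c := List.length_pos_iff.mpr hrow'
  have hn1 : 1 ≤ n := by simp [hn]
  -- LHS
  rw [pvPortA]
  have e1 : PySem.List.len (g0 :: gs) = (n : Int) := by rw [PySem.List.len_eq]
  have e2 : PySem.List.pyGetD (g0 :: gs) 0 [] = g0 := PySem.List.pyGetD_zero_cons _ _ _
  rw [e1, e2]
  rw [show PySem.List.len g0 = (c : Int) from by rw [PySem.List.len_eq]]
  rw [show ((c : Int)).toNat = c from by omega]
  rw [pvRangeDesc, pvOut0]
  rw [show ((0 : Int), (1 : Int)) = pvState c (n - n) from by rw [Nat.sub_self]; exact (pvState_zero c).symm]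
  rw [pvFoldInv c hc n n (List.replicate n (List.replicate c (0 : Int))) (le_refl n) (by simp)
      (fun r hr => by simp [hr])]
  -- RHS
  simp only [solve_a3df8b1e_alt, List.headD_cons]
  by_cases h1 : c = 1
  · rw [if_pos (by omega : g0.length = 1)]
    apply List.map_congr_left
    intro r hr
    rw [List.mem_range] at hr
    rw [if_pos hr]
    simp [pvRow, pvPos, h1]
  · rw [if_neg (by omega : ¬ g0.length = 1)]
    apply List.map_congr_left
    intro r hr
    rw [List.mem_range] at hr
    rw [if_pos hr]
    simp only [pvRow, pvPos, if_neg h1]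
    rfl

-- ===== VERDICT (by name: the statement is the Claim_ definition above) =====
theorem solve_a3df8b1e_spec : Claim_equal_solve_a3df8b1e := by
  intro grid _ hpre
  unfold Spec_solve_a3df8b1e
  exact pvMain grid hpre
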